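-- pv_equiv track=rewrite | github.com/SamvPy/DeNovo_Benchmark | package/denovo_utils/analysis/metaproteomics.py | get_species_specificity
-- ===== SOURCE A (Python) =====
-- def get_species_specificity(protein_list, fasta_dict):
--     species = []
--     for protein in protein_list:
--         for organism, org_spec_proteins in fasta_dict.items():
--             if organism in species:
--                 continue
--             if protein in org_spec_proteins:
--                 species.append(organism)
--     return species
-- ===== SOURCE B (Python) =====
-- def get_species_specificity(protein_list, fasta_dict):
--     # One pass over the fasta builds a protein -> [organisms] index (organisms in
--     # dict order, deduplicated); then one pass over the proteins collects unseen
--     # organisms with a seen-set.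
--     index = {}
--     for organism, org_spec_proteins in fasta_dict.items():
--         for protein in org_spec_proteins:
--             orgs = index.setdefault(protein, [])
--             if organism not in orgs:
--                 orgs.append(organism)
--     species = []
--     seen = set()
--     for protein in protein_list:
--         for organism in index.get(protein, ()):
--             if organism not in seen:
--                 seen.add(organism)
--                 species.append(organism)
--     return species
-- ===== Notes on version B (the rewrite author's own statement) =====
-- stated objective: faster
-- what changed: Instead of rescanning every organism's whole protein list for every query protein, B builds a protein-to-organisms index in one fasta scan and then emits unseen organisms per query protein with a seen-set.
import Mathlib
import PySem

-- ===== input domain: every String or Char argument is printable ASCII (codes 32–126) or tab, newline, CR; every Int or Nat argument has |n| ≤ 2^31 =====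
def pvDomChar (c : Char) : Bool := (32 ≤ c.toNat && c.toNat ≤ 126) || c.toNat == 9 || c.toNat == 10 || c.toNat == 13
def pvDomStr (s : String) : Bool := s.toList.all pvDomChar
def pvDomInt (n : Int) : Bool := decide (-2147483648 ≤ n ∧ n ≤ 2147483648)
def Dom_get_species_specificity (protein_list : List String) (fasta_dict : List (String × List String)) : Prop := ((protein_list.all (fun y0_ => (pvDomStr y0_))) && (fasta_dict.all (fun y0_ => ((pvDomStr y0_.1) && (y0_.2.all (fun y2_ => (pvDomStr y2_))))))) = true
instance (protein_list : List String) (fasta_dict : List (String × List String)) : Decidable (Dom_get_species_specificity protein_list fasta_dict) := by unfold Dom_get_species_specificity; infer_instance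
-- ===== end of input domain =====

-- B replaces A's per-protein rescan of the whole fasta dict by a one-scan
-- protein→organisms index followed by a seen-set pass over the proteins (faster).

-- ===== PORT A =====
def get_species_specificity (protein_list : List String) (fasta_dict : List (String × List String)) : List String :=
  protein_list.foldl (fun species protein =>
    fasta_dict.foldl (fun species e =>
      if species.contains e.1 then species
      else if e.2.contains protein then species ++ [e.1] else species) species) []

-- ===== PORT B =====
-- index build: for (organism, prots) in fasta_dict: for protein in prots:
--   orgs = index.setdefault(protein, []); if organism not in orgs: orgs.append(organism)
def gss_buildIndex (fasta_dict : List (String × List String)) : PySem.Dict String (List String) :=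
  fasta_dict.foldl (fun d e =>
    e.2.foldl (fun d protein =>
      let orgs := d.getD protein []
      if orgs.contains e.1 then d else d.insert protein (orgs ++ [e.1])) d)
    PySem.Dict.empty

def get_species_specificity_alt (protein_list : List String) (fasta_dict : List (String × List String)) : List String :=
  (protein_list.foldl (fun (st : List String × PySem.Set String) protein =>
      ((gss_buildIndex fasta_dict).getD protein []).foldl (fun st organism =>
        if PySem.Set.contains st.2 organism then st
        else (st.1 ++ [organism], PySem.Set.add st.2 organism)) st)
    ([], PySem.Set.empty)).1

-- ===== PRECONDITION & SPEC =====
-- Pre_ requires the organism keys to be distinct: a Python dict cannot hold duplicate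
-- keys, so association lists with repeated organisms do not correspond to any input A receives.
def Pre_get_species_specificity (protein_list : List String) (fasta_dict : List (String × List String)) : Prop :=
  (fasta_dict.map Prod.fst).Nodup
instance (protein_list : List String) (fasta_dict : List (String × List String)) : Decidable (Pre_get_species_specificity protein_list fasta_dict) := by unfold Pre_get_species_specificity; infer_instance

def pvWitness_get_species_specificity : List String × (List (String × List String)) :=
  (["p1", "p3"], [("orgA", ["p1", "p2"]), ("orgB", ["p2", "p1"]), ("orgC", [])])

def Spec_get_species_specificity (protein_list : List String) (fasta_dict : List (String × List String)) (out : List String) : Prop := out = get_species_specificity_alt protein_list fasta_dict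
instance (protein_list : List String) (fasta_dict : List (String × List String)) (out : List String) : Decidable (Spec_get_species_specificity protein_list fasta_dict out) := by unfold Spec_get_species_specificity; infer_instance

-- ===== CLAIM (what is proved, stated in full; the proofs are below) =====
def Claim_equal_get_species_specificity : Prop := ∀ (protein_list : List String) (fasta_dict : List (String × List String)), Dom_get_species_specificity protein_list fasta_dict → Pre_get_species_specificity protein_list fasta_dict → Spec_get_species_specificity protein_list fasta_dict (get_species_specificity protein_list fasta_dict)

-- ===== LEMMAS AND PROOFS =====

-- the organisms whose protein set contains p, in fasta order
def gss_orgsOf (p : String) (fasta_dict : List (String × List String)) : List String :=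
  fasta_dict.filterMap (fun e => if e.2.contains p then some e.1 else none)

-- append-if-unseen step shared by both characterisations
def gss_step (s : List String) (o : String) : List String :=
  if s.contains o then s else s ++ [o]

-- A's inner scan over the fasta is the unseen-append fold over gss_orgsOf
theorem gss_A_inner (protein : String) (fasta_dict : List (String × List String)) :
    ∀ s : List String,
      fasta_dict.foldl (fun species e =>
        if species.contains e.1 then species
        else if e.2.contains protein then species ++ [e.1] else species) s
      = (gss_orgsOf protein fasta_dict).foldl gss_step s := by
  induction fasta_dict with
  | nil => intro s; rfl
  | cons e fd ih =>
    intro s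
    have horg : gss_orgsOf protein (e :: fd)
        = (if protein ∈ e.2 then [e.1] else []) ++ gss_orgsOf protein fd := by
      by_cases h : protein ∈ e.2 <;> simp [gss_orgsOf, h]
    rw [List.foldl_cons, ih, horg]
    by_cases h : protein ∈ e.2
    · rw [if_pos h]
      simp only [List.singleton_append, List.foldl_cons]
      congr 1
      by_cases hs : e.1 ∈ s
      · simp [gss_step, hs]
      · simp [gss_step, hs, h]
    · rw [if_neg h]
      simp only [List.nil_append]
      congr 1
      by_cases hs : e.1 ∈ s <;> simp [hs, h]

-- one fasta entry's effect on the index, at every lookup key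
theorem gss_entry_getD (org : String) (prots : List String) :
    ∀ (d : PySem.Dict String (List String)) (q : String),
      ((prots.foldl (fun d protein =>
          let orgs := d.getD protein []
          if orgs.contains org then d else d.insert protein (orgs ++ [org])) d).getD q [])
      = if q ∈ prots ∧ org ∉ d.getD q []
        then d.getD q [] ++ [org] else d.getD q [] := by
  induction prots with
  | nil => intro d q; simp
  | cons pr rest ih =>
    intro d q
    simp only [List.foldl_cons]
    by_cases hc : (d.getD pr []).contains org
    · have hc' : org ∈ d.getD pr [] := by simpa using hc
      simp only [hc, if_pos, ih]
      by_cases hq : q = pr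
      · subst hq; simp [hc']
      · simp [List.mem_cons, hq]
    · have hc' : org ∉ d.getD pr [] := by simpa using hc
      simp only [hc, Bool.false_eq_true, ite_false, ih]
      rw [PySem.Dict.getD_insert]
      by_cases hq : q = pr
      · subst hq
        simp [hc', List.mem_cons]
      · simp [hq, List.mem_cons]

-- the index built from the fasta looks up exactly gss_orgsOf, given distinct keys
theorem gss_build_getD (p : String) :
    ∀ (fasta_dict : List (String × List String)) (d : PySem.Dict String (List String)),
      (fasta_dict.map Prod.fst).Nodup →
      (∀ e ∈ fasta_dict, ∀ q, e.1 ∉ d.getD q []) →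
      ((fasta_dict.foldl (fun d e =>
          e.2.foldl (fun d protein =>
            let orgs := d.getD protein []
            if orgs.contains e.1 then d else d.insert protein (orgs ++ [e.1])) d) d).getD p [])
      = d.getD p [] ++ gss_orgsOf p fasta_dict := by
  intro fasta_dict
  induction fasta_dict with
  | nil => intro d _ _; simp [gss_orgsOf]
  | cons e fd ih =>
    intro d hnd hfresh
    simp only [List.foldl_cons]
    have hself : e.1 ∉ d.getD p [] := hfresh e (by simp) p
    have hd2 : ∀ q, ((e.2.foldl (fun d protein =>
          let orgs := d.getD protein []
          if orgs.contains e.1 then d else d.insert protein (orgs ++ [e.1])) d).getD q [])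
        = if e.2.contains q ∧ e.1 ∉ d.getD q []
          then d.getD q [] ++ [e.1] else d.getD q [] := by
      intro q
      have := gss_entry_getD e.1 e.2 d q
      simpa using this
    rw [ih _ (by simpa using hnd.of_cons)]
    · rw [hd2 p]
      by_cases hp : e.2.contains p
      · have hp' : p ∈ e.2 := by simpa using hp
        simp [gss_orgsOf, hp', hself]
      · have hp' : p ∉ e.2 := by simpa using hp
        simp [gss_orgsOf, hp']
    · intro e' he' q
      rw [hd2 q]
      have hne : e'.1 ≠ e.1 := by
        intro hEq
        have : e.1 ∈ fd.map Prod.fst := by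
          rw [← hEq]; exact List.mem_map_of_mem he'
        exact (List.nodup_cons.mp (by simpa using hnd)).1 this
      have h1 : e'.1 ∉ d.getD q [] := hfresh e' (List.mem_cons_of_mem _ he') q
      split
      · simp [List.mem_append, h1, hne]
      · exact h1

-- B's inner per-protein loop keeps species and the seen set equal and acts like gss_step
theorem gss_B_inner (L : List String) :
    ∀ s : List String,
      L.foldl (fun (st : List String × PySem.Set String) organism =>
        if PySem.Set.contains st.2 organism then st
        else (st.1 ++ [organism], PySem.Set.add st.2 organism)) (s, s)
      = (L.foldl gss_step s, L.foldl gss_step s) := by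
  induction L with
  | nil => intro s; rfl
  | cons o L ih =>
    intro s
    simp only [List.foldl_cons]
    by_cases h : o ∈ s
    · have hb : PySem.Set.contains s o = true := by simp [PySem.Set.contains, h]
      have hstep : gss_step s o = s := by simp [gss_step, h]
      rw [hb, if_pos rfl, ih, hstep]
    · have hb : PySem.Set.contains s o = false := by simpa [PySem.Set.contains] using h
      have hadd : PySem.Set.add s o = s ++ [o] := by simp [PySem.Set.add, h]
      have hstep : gss_step s o = s ++ [o] := by simp [gss_step, h]
      rw [hb]
      simp only [Bool.false_eq_true, ite_false]
      rw [hadd, ih, hstep]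

-- B's outer loop over a pair state is the plain gss_step fold, twice
theorem gss_B_outer (orgs : String → List String) :
    ∀ (pl : List String) (s : List String),
      pl.foldl (fun (st : List String × PySem.Set String) protein =>
        (orgs protein).foldl (fun st organism =>
          if PySem.Set.contains st.2 organism then st
          else (st.1 ++ [organism], PySem.Set.add st.2 organism)) st) (s, s)
      = (pl.foldl (fun s protein => (orgs protein).foldl gss_step s) s,
         pl.foldl (fun s protein => (orgs protein).foldl gss_step s) s) := by
  intro pl
  induction pl with
  | nil => intro s; rfl
  | cons p pl ih =>
    intro s
    simp only [List.foldl_cons]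
    rw [gss_B_inner, ih]

-- ===== VERDICT (by name: the statement is the Claim_ definition above) =====
theorem get_species_specificity_spec : Claim_equal_get_species_specificity := by
  intro protein_list fasta_dict _ hpre
  unfold Spec_get_species_specificity get_species_specificity get_species_specificity_alt
  have hidx : ∀ p, (gss_buildIndex fasta_dict).getD p [] = gss_orgsOf p fasta_dict := by
    intro p
    unfold gss_buildIndex
    rw [gss_build_getD p fasta_dict PySem.Dict.empty hpre (by intro e _ q; simp)]
    simp
  simp only [PySem.Set.empty]
  rw [gss_B_outer (fun protein => (gss_buildIndex fasta_dict).getD protein []) protein_list []]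
  congr 1
  funext s protein
  rw [gss_A_inner, hidx]
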